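-- pv_equiv track=rewrite | github.com/nwleedev/engine | plugins/session-memory/scripts/handwrite_context.py | extract_delta
-- ===== SOURCE A (Python) =====
-- def extract_delta(messages, last_processed_uuid):
--     """Return messages after last_processed_uuid. If None, return all."""
--     if not last_processed_uuid:
--         return messages
--     found = False
--     delta = []
--     for msg in messages:
--         if found:
--             delta.append(msg)
--         if msg.get("uuid") == last_processed_uuid:
--             found = True
--     if not found:
--         return messages  # transcript rotated; use all messages as fallback
--     return delta
-- ===== SOURCE B (Python) =====
-- def extract_delta(messages, last_processed_uuid):
--     """Return messages after last_processed_uuid. If None, return all."""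
--     if not last_processed_uuid:
--         return messages
--     idx = next((i for i, m in enumerate(messages)
--                 if m.get("uuid") == last_processed_uuid), None)
--     if idx is None:
--         return messages  # transcript rotated; use all messages as fallback
--     return messages[idx + 1:]
-- ===== Notes on version B (the rewrite author's own statement) =====
-- stated objective: simpler
-- what changed: Replaces the boolean-flag accumulate loop (append every message once found) with a locate-then-slice structure: find the first index whose uuid matches and return messages[idx+1:], or all messages when no index is found.
import Mathlib
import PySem

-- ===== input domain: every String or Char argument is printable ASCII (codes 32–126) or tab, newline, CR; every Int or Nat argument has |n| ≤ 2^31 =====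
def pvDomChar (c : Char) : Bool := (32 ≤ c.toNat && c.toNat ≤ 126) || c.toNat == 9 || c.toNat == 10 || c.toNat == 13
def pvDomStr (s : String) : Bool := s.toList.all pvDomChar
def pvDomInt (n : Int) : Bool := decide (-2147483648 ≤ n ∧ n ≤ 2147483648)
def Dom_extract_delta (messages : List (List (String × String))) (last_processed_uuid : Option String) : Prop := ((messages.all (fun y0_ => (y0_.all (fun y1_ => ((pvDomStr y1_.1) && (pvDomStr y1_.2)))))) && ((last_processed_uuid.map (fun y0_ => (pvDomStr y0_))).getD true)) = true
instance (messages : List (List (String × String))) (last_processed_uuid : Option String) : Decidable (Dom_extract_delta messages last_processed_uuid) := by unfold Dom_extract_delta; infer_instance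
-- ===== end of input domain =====

-- B replaces A's boolean-flag accumulate loop with locate-the-first-match-then-slice (simpler decomposition).

-- ===== PORT A =====
-- msg.get("uuid"): the Python dict is modelled as its association list; dict(pairs) lookup via PySem.Dict.ofList
def pvGetUuid (msg : List (String × String)) : Option String :=
  (PySem.Dict.ofList msg).get? "uuid"

def extract_delta (messages : List (List (String × String))) (last_processed_uuid : Option String) : List (List (String × String)) :=
  match last_processed_uuid with
  | none => messages
  | some u =>
    if u == "" then messages
    else
      let st := messages.foldl
        (fun (st : Bool × List (List (String × String))) msg =>
          ((if pvGetUuid msg == some u then true else st.1),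
           (if st.1 then st.2 ++ [msg] else st.2)))
        (false, [])
      if !st.1 then messages else st.2

-- ===== PORT B =====
def extract_delta_alt (messages : List (List (String × String))) (last_processed_uuid : Option String) : List (List (String × String)) :=
  match last_processed_uuid with
  | none => messages
  | some u =>
    if u == "" then messages
    else
      match messages.findIdx? (fun m => pvGetUuid m == some u) with
      | none => messages
      | some i => messages.drop (i + 1)

-- ===== PRECONDITION & SPEC =====
def Spec_extract_delta (messages : List (List (String × String))) (last_processed_uuid : Option String) (out : List (List (String × String))) : Prop := out = extract_delta_alt messages last_processed_uuid
instance (messages : List (List (String × String))) (last_processed_uuid : Option String) (out : List (List (String × String))) : Decidable (Spec_extract_delta messages last_processed_uuid out) := by unfold Spec_extract_delta; infer_instance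

-- ===== CLAIM (what is proved, stated in full; the proofs are below) =====
def Claim_equal_extract_delta : Prop := ∀ (messages : List (List (String × String))) (last_processed_uuid : Option String), Dom_extract_delta messages last_processed_uuid → Spec_extract_delta messages last_processed_uuid (extract_delta messages last_processed_uuid)

-- ===== LEMMAS AND PROOFS =====

-- once found=true, the loop appends every remaining message
theorem pv_fold_true (u : String) (ms : List (List (String × String)))
    (acc : List (List (String × String))) :
    ms.foldl
      (fun (st : Bool × List (List (String × String))) msg =>
        ((if pvGetUuid msg == some u then true else st.1),
         (if st.1 then st.2 ++ [msg] else st.2)))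
      (true, acc) = (true, acc ++ ms) := by
  induction ms generalizing acc with
  | nil => simp
  | cons m ms ih =>
    simp only [List.foldl_cons, if_true]
    split <;> simpa using ih (acc ++ [m])

-- before the first match, the loop keeps found=false and the accumulator unchanged;
-- at the first match it switches to the append-everything phase
theorem pv_fold_false (u : String) (ms : List (List (String × String)))
    (acc : List (List (String × String))) :
    ms.foldl
      (fun (st : Bool × List (List (String × String))) msg =>
        ((if pvGetUuid msg == some u then true else st.1),
         (if st.1 then st.2 ++ [msg] else st.2)))
      (false, acc) =
      match ms.findIdx? (fun m => pvGetUuid m == some u) with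
      | none => (false, acc)
      | some i => (true, acc ++ ms.drop (i + 1)) := by
  induction ms generalizing acc with
  | nil => simp
  | cons m ms ih =>
    simp only [List.foldl_cons, List.findIdx?_cons]
    by_cases h : pvGetUuid m == some u
    · simp only [h, if_true, Bool.false_eq_true, if_false]
      rw [pv_fold_true]
      simp
    · simp only [h, Bool.false_eq_true, if_false]
      rw [ih acc]
      cases hfi : ms.findIdx? (fun m => pvGetUuid m == some u) with
      | none => simp
      | some i => simp [List.drop_succ_cons]

-- ===== VERDICT (by name: the statement is the Claim_ definition above) =====
theorem extract_delta_spec : Claim_equal_extract_delta := by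
  intro messages lpu _
  unfold Spec_extract_delta extract_delta extract_delta_alt
  cases lpu with
  | none => rfl
  | some u =>
    by_cases hu : u == ""
    · simp [hu]
    · simp only [hu, if_false, Bool.false_eq_true]
      rw [pv_fold_false]
      cases hfi : messages.findIdx? (fun m => pvGetUuid m == some u) <;> simp
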